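-- pv_equiv track=rewrite | github.com/pareronia/everybody.codes | src/main/python/2024_07.py | run_race
-- ===== SOURCE A (Python) =====
-- import itertools
-- from collections import defaultdict
--
-- def run_race(
--     input_data: list[tuple[str, list[str]]], track: str, loops: int
-- ) -> dict[str, list[int]]:
--     d = defaultdict[str, list[int]](list)
--     for line in input_data:
--         k, plan = line
--         d[k] = [10]
--         actions = itertools.cycle(plan)
--         for _ in range(loops):
--             for t in track:
--                 v = next(actions)
--                 v = t if t in {"+", "-"} else v
--                 d[k].append(
--                     d[k][-1] + (1 if v == "+" else -1 if v == "-" else 0)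
--                 )
--     return d
-- ===== SOURCE B (Python) =====
-- from collections import defaultdict
-- from math import lcm
--
-- def run_race(input_data, track, loops):
--     # Exploit periodicity: per-step deltas repeat with period lcm(len(track), len(plan)),
--     # so simulate one period only and emit the trace by the closed form
--     # pos[i] = 10 + (i // per) * drift + pre[i % per].
--     L = len(track)
--     steps = L * loops if loops > 0 else 0
--     d = defaultdict(list)
--     for k, plan in input_data:
--         if steps == 0:
--             d[k] = [10]
--             continue
--         P = len(plan)
--         per = lcm(L, P)
--         pre = [0]
--         for i in range(per):
--             t = track[i % L]
--             c = t if t in "+-" else plan[i % P]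
--             pre.append(pre[-1] + (1 if c == "+" else -1 if c == "-" else 0))
--         drift = pre[per]
--         d[k] = [10 + (i // per) * drift + pre[i % per] for i in range(steps + 1)]
--     return d
-- ===== Notes on version B (the rewrite author's own statement) =====
-- stated objective: alternative
-- what changed: B does not simulate the whole race: it simulates only one lcm(len(track), len(plan)) period of deltas per racer and emits the full cumulative trace by the closed form pos[i] = 10 + (i // per) * drift + pre[i % per], instead of A's step-by-step cycle-iterator simulation appending last+delta through the dict. Pre_ excludes inputs with an empty plan when at least one step runs, where A raises StopIteration.
import Mathlib
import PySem

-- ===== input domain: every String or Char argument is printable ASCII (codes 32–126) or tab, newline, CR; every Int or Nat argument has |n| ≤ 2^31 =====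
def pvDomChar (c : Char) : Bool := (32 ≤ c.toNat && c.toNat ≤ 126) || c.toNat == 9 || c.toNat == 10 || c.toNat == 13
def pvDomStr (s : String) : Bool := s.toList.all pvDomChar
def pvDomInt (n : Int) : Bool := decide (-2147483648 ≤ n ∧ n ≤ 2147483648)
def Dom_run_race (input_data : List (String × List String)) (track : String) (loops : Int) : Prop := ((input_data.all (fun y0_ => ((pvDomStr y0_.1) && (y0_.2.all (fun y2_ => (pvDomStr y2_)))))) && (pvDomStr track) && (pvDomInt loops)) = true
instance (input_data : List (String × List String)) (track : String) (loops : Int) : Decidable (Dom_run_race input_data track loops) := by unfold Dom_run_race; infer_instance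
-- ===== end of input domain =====

-- B replaces A's full step-by-step simulation (cycle iterator, append last+delta through the
-- dict) by a per-racer simulation of ONE lcm(len track, len plan) period of deltas plus the
-- closed form pos[i] = 10 + (i // per)·drift + pre[i % per] (objective: alternative algorithm).
-- Return value only; both Pythons return a (default)dict, ported as its item list.

-- ===== PORT A =====
-- one step of A's inner `for t in track` loop; st.2 is the itertools.cycle cursor
def runStepA (plan : List String) (k : String)
    (st : PySem.Dict String (List Int) × Nat) (t : Char) : PySem.Dict String (List Int) × Nat :=
  -- v = next(actions): the cycle yields plan[cursor % len(plan)]; Pre_ excludes the empty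
  -- plan (there Python raises StopIteration), so the `""` default is never consulted
  let v := plan.getD (st.2 % plan.length) ""
  let v := if t = '+' ∨ t = '-' then String.ofList [t] else v
  (st.1.modify k [] (fun l =>
      l ++ [(PySem.List.pyGet? l (-1)).getD 0 +
            (if v = "+" then 1 else if v = "-" then -1 else 0)]), st.2 + 1)

-- one line of A's outer loop: d[k] = [10], then loops passes over the track
def runLineA (track : String) (loops : Int) (d : PySem.Dict String (List Int))
    (line : String × List String) : PySem.Dict String (List Int) :=
  let k := line.1
  let plan := line.2
  let d := d.insert k [10]
  ((List.range loops.toNat).foldl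
      (fun st _ => track.toList.foldl (runStepA plan k) st) (d, 0)).1

def run_race (input_data : List (String × List String)) (track : String) (loops : Int) :
    List (String × List Int) :=
  (input_data.foldl (runLineA track loops) PySem.Dict.empty).items

-- ===== PORT B =====
-- pre = prefix sums of the deltas of ONE period (track[i % L] and the indices are always in
-- range here since the loop runs only when the respective lengths are positive, so getD is exact)
def preB (tk : List Char) (plan : List String) (per : Nat) : List Int :=
  (List.range per).foldl (fun pre i =>
    let t := tk.getD (i % tk.length) ' '
    let c := if t = '+' ∨ t = '-' then String.ofList [t] else plan.getD (i % plan.length) ""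
    pre ++ [(PySem.List.pyGet? pre (-1)).getD 0 +
            (if c = "+" then 1 else if c = "-" then -1 else 0)]) [0]

-- one line of B: period simulation, then the closed-form trace
def lineB (track : String) (loops : Int) (d : PySem.Dict String (List Int))
    (line : String × List String) : PySem.Dict String (List Int) :=
  let k := line.1
  let plan := line.2
  let L := track.toList.length
  let steps : Int := if 0 < loops then (L : Int) * loops else 0
  if steps = 0 then d.insert k [10]
  else
    let per := Nat.lcm L plan.length
    let pre := preB track.toList plan per
    let drift := pre.getD per 0
    d.insert k ((List.range (steps.toNat + 1)).map (fun i =>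
      10 + ((i / per : Nat) : Int) * drift + pre.getD (i % per) 0))

def run_race_alt (input_data : List (String × List String)) (track : String) (loops : Int) :
    List (String × List Int) :=
  (input_data.foldl (lineB track loops) PySem.Dict.empty).items

-- ===== PRECONDITION & SPEC =====
-- Pre_ excludes exactly the inputs where A raises StopIteration: some line has an empty plan
-- while at least one step runs (loops ≥ 1 and a non-empty track).
def Pre_run_race (input_data : List (String × List String)) (track : String) (loops : Int) : Prop :=
  (0 < loops ∧ track ≠ "") → ∀ line ∈ input_data, line.2 ≠ []
instance (input_data : List (String × List String)) (track : String) (loops : Int) :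
    Decidable (Pre_run_race input_data track loops) := by unfold Pre_run_race; infer_instance

def pvWitness_run_race : (List (String × List String)) × String × Int :=
  ([("A", ["+", "="]), ("B", ["-"])], "=+-", 2)

def Spec_run_race (input_data : List (String × List String)) (track : String) (loops : Int)
    (out : List (String × List Int)) : Prop := out = run_race_alt input_data track loops
instance (input_data : List (String × List String)) (track : String) (loops : Int)
    (out : List (String × List Int)) : Decidable (Spec_run_race input_data track loops out) := by
  unfold Spec_run_race; infer_instance

-- ===== CLAIM (what is proved, stated in full; the proofs are below) =====
def Claim_equal_run_race : Prop := ∀ (input_data : List (String × List String)) (track : String) (loops : Int), Dom_run_race input_data track loops → Pre_run_race input_data track loops → Spec_run_race input_data track loops (run_race input_data track loops)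

-- ===== LEMMAS AND PROOFS =====

-- last element as A reads it (d[k][-1], default never used on the non-empty lists arising)
def pvLast (l : List Int) : Int := (PySem.List.pyGet? l (-1)).getD 0

-- the delta A computes at cycle-cursor idx on track char t
def pvDltA (plan : List String) (idx : Nat) (t : Char) : Int :=
  let v := plan.getD (idx % plan.length) ""
  let v := if t = '+' ∨ t = '-' then String.ofList [t] else v
  if v = "+" then 1 else if v = "-" then -1 else 0

-- the delta at flat step i
def pvDelta (tk : List Char) (plan : List String) (i : Nat) : Int :=
  pvDltA plan i (tk.getD (i % tk.length) ' ')

-- sum of the first i deltas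
def pvS (tk : List Char) (plan : List String) : Nat → Int
  | 0 => 0
  | i + 1 => pvS tk plan i + pvDelta tk plan i

-- A's per-step list update, with the dict stripped away
def pvFA (plan : List String) (s : List Int × Nat) (t : Char) : List Int × Nat :=
  (s.1 ++ [pvLast s.1 + pvDltA plan s.2 t], s.2 + 1)

-- the common flat step: append last + delta(i)
def pvG (tk : List Char) (plan : List String) (l : List Int) (i : Nat) : List Int :=
  l ++ [pvLast l + pvDelta tk plan i]

theorem pv_modify_insert (d : PySem.Dict String (List Int)) (k : String) (v : List Int)
    (f : List Int → List Int) : (d.insert k v).modify k [] f = d.insert k (f v) := by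
  simp [PySem.Dict.modify, PySem.Dict.getD_insert_self, PySem.Dict.insert_insert_self]

theorem pvLast_append (l : List Int) (a : Int) : pvLast (l ++ [a]) = a := by
  simp [pvLast, PySem.List.pyGet?, PySem.List.pyIdx?]

-- strip the dict out of one pass over a char list
theorem pv_stripDict (plan : List String) (k : String) :
    ∀ (cs : List Char) (d : PySem.Dict String (List Int)) (lst : List Int) (idx : Nat),
      cs.foldl (runStepA plan k) (d.insert k lst, idx)
        = (d.insert k (cs.foldl (pvFA plan) (lst, idx)).1, (cs.foldl (pvFA plan) (lst, idx)).2) := by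
  intro cs
  induction cs with
  | nil => intro d lst idx; rfl
  | cons t cs ih =>
    intro d lst idx
    have hstep : runStepA plan k (d.insert k lst, idx)  t
        = (d.insert k (pvFA plan (lst, idx) t).1, (pvFA plan (lst, idx) t).2) := by
      simp [runStepA, pvFA, pvDltA, pvLast, pv_modify_insert]
    simp only [List.foldl_cons, hstep]
    exact ih d _ _

-- strip the dict out of the whole loops × track nest
theorem pv_stripDict_outer (track : String) (plan : List String) (k : String) :
    ∀ (n : Nat) (d : PySem.Dict String (List Int)) (lst : List Int) (idx : Nat),
      (List.range n).foldl (fun st _ => track.toList.foldl (runStepA plan k) st) (d.insert k lst, idx)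
        = (d.insert k ((List.range n).foldl (fun s _ => track.toList.foldl (pvFA plan) s) (lst, idx)).1,
           ((List.range n).foldl (fun s _ => track.toList.foldl (pvFA plan) s) (lst, idx)).2) := by
  intro n
  induction n with
  | zero => intro d lst idx; rfl
  | succ n ih =>
    intro d lst idx
    simp only [List.range_succ, List.foldl_append, List.foldl_cons, List.foldl_nil, ih]
    rcases h : (List.range n).foldl (fun s _ => track.toList.foldl (pvFA plan) s) (lst, idx) with ⟨lst', idx'⟩
    exact pv_stripDict plan k track.toList d lst' idx'

-- one pass of A from a cursor aligned at m·L equals a flat range' fold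
theorem pv_pass (track : String) (plan : List String) (m : Nat) :
    ∀ (cs : List Char) (j : Nat), track.toList.drop j = cs →
      ∀ (lst : List Int),
        cs.foldl (pvFA plan) (lst, m * track.toList.length + j)
          = ((List.range' (m * track.toList.length + j) cs.length).foldl (pvG track.toList plan) lst,
             m * track.toList.length + j + cs.length) := by
  intro cs
  induction cs with
  | nil => intro j _ lst; simp
  | cons t cs ih =>
    intro j hj lst
    have hjlt : j < track.toList.length := by
      by_contra hle
      rw [List.drop_eq_nil_of_le (Nat.le_of_not_lt hle)] at hj
      simp at hj
    have hget : track.toList[j]? = some t := by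
      rw [← List.head?_drop, hj]; rfl
    have hmod : (m * track.toList.length + j) % track.toList.length = j :=
      (Nat.mul_add_mod_self_right m _ j).trans (Nat.mod_eq_of_lt hjlt)
    have hchar : track.toList.getD ((m * track.toList.length + j) % track.toList.length) ' ' = t := by
      rw [hmod, List.getD_eq_getElem?_getD, hget]; rfl
    have hdrop : track.toList.drop (j + 1) = cs := by
      rw [← List.drop_drop, hj]; rfl
    have hstep : pvFA plan (lst, m * track.toList.length + j) t
        = (pvG track.toList plan lst (m * track.toList.length + j),
           m * track.toList.length + j + 1) := by
      unfold pvFA pvG pvDelta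
      rw [hchar]
    have harith : m * track.toList.length + j + 1 = m * track.toList.length + (j + 1) := by omega
    simp only [List.foldl_cons, hstep, harith]
    rw [ih (j + 1) hdrop]
    rw [List.length_cons, List.range'_succ, List.foldl_cons, ← harith]
    simp only [Prod.mk.injEq]
    exact ⟨trivial, by omega⟩

-- all loops passes of A equal one flat fold over range (n·L)
theorem pv_full (track : String) (plan : List String) :
    ∀ (n : Nat) (lst : List Int),
      (List.range n).foldl (fun s _ => track.toList.foldl (pvFA plan) s) (lst, 0)
        = ((List.range' 0 (n * track.toList.length)).foldl (pvG track.toList plan) lst,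
           n * track.toList.length) := by
  intro n
  induction n with
  | zero => intro lst; simp
  | succ n ih =>
    intro lst
    simp only [List.range_succ, List.foldl_append, List.foldl_cons, List.foldl_nil, ih]
    have hp := pv_pass track plan n track.toList 0 rfl
      ((List.range' 0 (n * track.toList.length)).foldl (pvG track.toList plan) lst)
    rw [Nat.add_zero] at hp
    rw [hp]
    have hr : List.range' 0 ((n + 1) * track.toList.length)
        = List.range' 0 (n * track.toList.length) ++
          List.range' (n * track.toList.length) track.toList.length := by
      rw [show (n + 1) * track.toList.length
            = n * track.toList.length + track.toList.length from by ring,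
          ← List.range'_append_1, Nat.zero_add]
    rw [hr, List.foldl_append]
    simp only [Prod.mk.injEq]
    exact ⟨trivial, by ring⟩

-- the append-last fold is the scanl of the partial sums
theorem pv_scanl (tk : List Char) (plan : List String) (b : Int) :
    ∀ m, (List.range m).foldl (pvG tk plan) [b]
        = (List.range (m + 1)).map (fun i => b + pvS tk plan i) := by
  intro m
  induction m with
  | zero => simp [pvS]
  | succ m ih =>
    rw [List.range_succ, List.foldl_append, List.foldl_cons, List.foldl_nil, ih]
    have hlast : pvLast ((List.range (m + 1)).map (fun i => b + pvS tk plan i))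
        = b + pvS tk plan m := by
      rw [List.range_succ, List.map_append]; exact pvLast_append _ _
    rw [show List.range (m + 1 + 1) = List.range (m + 1) ++ [m + 1] from List.range_succ,
        List.map_append]
    unfold pvG
    rw [hlast]
    congr 1
    simp [pvS, Int.add_assoc]

-- B's period pass is that same scanl starting from 0
theorem pv_preB (tk : List Char) (plan : List String) (per : Nat) :
    preB tk plan per = (List.range (per + 1)).map (fun i => (0 : Int) + pvS tk plan i) := by
  unfold preB
  have hf : (fun (pre : List Int) (i : Nat) =>
      let t := tk.getD (i % tk.length) ' '
      let c := if t = '+' ∨ t = '-' then String.ofList [t] else plan.getD (i % plan.length) ""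
      pre ++ [(PySem.List.pyGet? pre (-1)).getD 0 +
              (if c = "+" then 1 else if c = "-" then -1 else 0)])
      = pvG tk plan := by
    funext pre i
    unfold pvG pvDelta pvDltA pvLast
    by_cases h : tk.getD (i % tk.length) ' ' = '+' ∨ tk.getD (i % tk.length) ' ' = '-' <;> simp_all
  rw [hf, pv_scanl]

theorem pv_getD_map_range (f : Nat → Int) (n r : Nat) (h : r < n) :
    ((List.range n).map f).getD r 0 = f r := by
  rw [List.getD_eq_getElem?_getD, List.getElem?_map, List.getElem?_range h]
  rfl

-- periodicity of the deltas with period any common multiple of the two lengths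
theorem pv_delta_per (tk : List Char) (plan : List String) (per : Nat)
    (hL : tk.length ∣ per) (hP : plan.length ∣ per) (i : Nat) :
    pvDelta tk plan (per + i) = pvDelta tk plan i := by
  obtain ⟨a, ha⟩ := hL
  obtain ⟨b, hb⟩ := hP
  have h1 : (per + i) % tk.length = i % tk.length := by rw [ha, Nat.mul_add_mod]
  have h2 : (per + i) % plan.length = i % plan.length := by rw [hb, Nat.mul_add_mod]
  simp only [pvDelta, pvDltA, h1, h2]

theorem pv_S_add (tk : List Char) (plan : List String) (per : Nat)
    (hL : tk.length ∣ per) (hP : plan.length ∣ per) :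
    ∀ i, pvS tk plan (per + i) = pvS tk plan per + pvS tk plan i := by
  intro i
  induction i with
  | zero => simp [pvS]
  | succ i ih =>
    show pvS tk plan (per + i + 1) = _
    simp only [pvS, ih, pv_delta_per tk plan per hL hP i]
    ring

theorem pv_S_mul (tk : List Char) (plan : List String) (per : Nat)
    (hL : tk.length ∣ per) (hP : plan.length ∣ per) :
    ∀ q r, pvS tk plan (per * q + r) = (q : Int) * pvS tk plan per + pvS tk plan r := by
  intro q
  induction q with
  | zero => intro r; simp
  | succ q ih =>
    intro r
    rw [show per * (q + 1) + r = per + (per * q + r) from by ring,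
        pv_S_add tk plan per hL hP, ih]
    push_cast
    ring

theorem pv_closed (tk : List Char) (plan : List String) (per : Nat) (_hper : 0 < per)
    (hL : tk.length ∣ per) (hP : plan.length ∣ per) (i : Nat) :
    ((i / per : Nat) : Int) * pvS tk plan per + pvS tk plan (i % per) = pvS tk plan i := by
  conv_rhs => rw [← Nat.div_add_mod i per]
  rw [pv_S_mul tk plan per hL hP]

-- one line of A equals one line of B (given a non-empty plan whenever a step runs)
theorem pv_lineEq (track : String) (loops : Int) (d : PySem.Dict String (List Int))
    (line : String × List String)
    (hp : (0 < loops ∧ track.toList ≠ []) → line.2 ≠ []) :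
    runLineA track loops d line = lineB track loops d line := by
  rcases line with ⟨k, plan⟩
  have hA : runLineA track loops d (k, plan)
      = d.insert k ((List.range (loops.toNat * track.toList.length + 1)).map
          (fun i => 10 + pvS track.toList plan i)) := by
    show ((List.range loops.toNat).foldl
        (fun st _ => track.toList.foldl (runStepA plan k) st) (d.insert k [10], 0)).1 = _
    rw [pv_stripDict_outer track plan k loops.toNat d [10] 0]
    rw [pv_full track plan loops.toNat [10], ← List.range_eq_range', pv_scanl]
  by_cases hs : (if 0 < loops then (track.toList.length : Int) * loops else 0) = 0
  · have hz : loops.toNat * track.toList.length = 0 := by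
      by_cases hl : 0 < loops
      · rw [if_pos hl] at hs
        rcases mul_eq_zero.mp hs with h | h
        · have : track.toList.length = 0 := by exact_mod_cast h
          simp [this]
        · omega
      · have : loops.toNat = 0 := by omega
        simp [this]
    rw [hA, hz]
    unfold lineB
    rw [if_pos hs]
    simp [pvS]
  · have hl : 0 < loops := by
      by_cases h : 0 < loops
      · exact h
      · rw [if_neg h] at hs; exact absurd rfl hs
    have hL0 : track.toList.length ≠ 0 := by
      intro h
      rw [if_pos hl, h] at hs
      simp at hs
    have hplan : plan ≠ [] := hp ⟨hl, fun h => hL0 (by simp [h])⟩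
    have hP0 : plan.length ≠ 0 := fun h => hplan (List.length_eq_zero_iff.mp h)
    have hper : 0 < Nat.lcm track.toList.length plan.length :=
      Nat.pos_of_ne_zero (Nat.lcm_ne_zero hL0 hP0)
    have hsteps : (if 0 < loops then (track.toList.length : Int) * loops else 0).toNat
        = loops.toNat * track.toList.length := by
      rw [if_pos hl]
      obtain ⟨m, rfl⟩ := Int.eq_ofNat_of_zero_le hl.le
      rw [← Int.natCast_mul, Int.toNat_natCast, Int.toNat_natCast, Nat.mul_comm]
    rw [hA]
    unfold lineB
    rw [if_neg hs, hsteps]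
    congr 1
    apply List.map_congr_left
    intro i _
    rw [pv_preB,
        pv_getD_map_range _ _ _ (Nat.lt_succ_self _),
        pv_getD_map_range _ _ _ (Nat.lt_succ_of_lt (Nat.mod_lt i hper)),
        Int.zero_add, Int.zero_add, add_assoc,
        pv_closed track.toList plan _ hper (Nat.dvd_lcm_left _ _) (Nat.dvd_lcm_right _ _) i]

theorem pv_fold_congr (track : String) (loops : Int) :
    ∀ (l : List (String × List String)) (d : PySem.Dict String (List Int)),
      (∀ line ∈ l, (0 < loops ∧ track.toList ≠ []) → line.2 ≠ []) →
      l.foldl (runLineA track loops) d = l.foldl (lineB track loops) d := by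
  intro l
  induction l with
  | nil => intro d _; rfl
  | cons x xs ih =>
    intro d h
    simp only [List.foldl_cons]
    rw [pv_lineEq track loops d x (h x (by simp))]
    exact ih _ (fun line hm => h line (by simp [hm]))

-- ===== VERDICT (by name: the statement is the Claim_ definition above) =====
theorem run_race_spec : Claim_equal_run_race := by
  intro input_data track loops _ hpre
  unfold Spec_run_race run_race run_race_alt
  have h : ∀ line ∈ input_data, (0 < loops ∧ track.toList ≠ []) → line.2 ≠ [] := by
    intro line hm hc
    exact hpre ⟨hc.1, fun he => hc.2 (by rw [he]; rfl)⟩ line hm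
  rw [pv_fold_congr track loops input_data PySem.Dict.empty h]
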